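-- pv_equiv track=rewrite | github.com/KLGR123/latex2word | tex.py | find_unescaped_percent
-- ===== SOURCE A (Python) =====
-- def find_unescaped_percent(line: str) -> int:
--     """
--     Return the index of the first unescaped '%' in the line, or -1 if none.
--     This is a best-effort comment detector for LaTeX.
--     """
--     i = 0
--     while i < len(line):
--         if line[i] == "%":
--             # Count backslashes immediately before '%'
--             bs = 0
--             j = i - 1
--             while j >= 0 and line[j] == "\\":
--                 bs += 1
--                 j -= 1
--             if bs % 2 == 0:  # even number means '%' is not escaped
--                 return i
--         i += 1
--     return -1
-- ===== SOURCE B (Python) =====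
-- def find_unescaped_percent(line: str) -> int:
--     """
--     Return the index of the first unescaped percent sign in the line, or -1 if none.
--     One pass: maintain the length of the run of backslashes just before i.
--     """
--     bs = 0
--     for i, ch in enumerate(line):
--         if ch == "%" and bs % 2 == 0:
--             return i
--         bs = bs + 1 if ch == "\\" else 0
--     return -1
-- ===== Notes on version B (the rewrite author's own statement) =====
-- stated objective: faster
-- what changed: Single forward pass carrying the length of the current backslash run, instead of rescanning backwards from every percent sign to count preceding backslashes.
import Mathlib
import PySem

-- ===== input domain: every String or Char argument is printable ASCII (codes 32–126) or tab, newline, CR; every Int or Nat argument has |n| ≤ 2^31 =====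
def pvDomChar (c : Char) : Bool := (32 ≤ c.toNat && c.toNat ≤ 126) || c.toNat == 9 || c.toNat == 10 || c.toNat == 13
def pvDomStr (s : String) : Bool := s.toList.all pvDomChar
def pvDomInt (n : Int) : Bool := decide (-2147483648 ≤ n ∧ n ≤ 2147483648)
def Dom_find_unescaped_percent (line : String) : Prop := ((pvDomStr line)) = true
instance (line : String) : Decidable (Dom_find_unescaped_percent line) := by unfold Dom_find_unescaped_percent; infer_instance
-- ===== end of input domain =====

-- B replaces A's backward rescan at each percent sign by one forward pass carrying the backslash-run length (faster).

-- ===== PORT A =====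
-- inner while loop of A: counts backslashes immediately before position j+1, scanning backwards
def pvA_count (l : List Char) (j : Int) : Nat :=
  if h : 0 ≤ j ∧ PySem.List.pyGet? l j = some '\\' then
    pvA_count l (j - 1) + 1
  else 0
termination_by (j+1).toNat
decreasing_by obtain ⟨h1,-⟩ := h; omega

-- outer while loop of A
def pvA_loop (l : List Char) (i : Nat) : Int :=
  if h : i < l.length then
    if l[i] = '%' ∧ pvA_count l ((i : Int) - 1) % 2 = 0 then (i : Int)
    else pvA_loop l (i + 1)
  else -1
termination_by l.length - i

def find_unescaped_percent (line : String) : Int := pvA_loop line.toList 0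

-- ===== PORT B =====
-- single pass: bs = length of the run of backslashes just before the current index
def pvB_loop : List Char → Nat → Nat → Int
  | [], _, _ => -1
  | c :: rest, i, bs =>
    if c = '%' ∧ bs % 2 = 0 then (i : Int)
    else pvB_loop rest (i + 1) (if c = '\\' then bs + 1 else 0)

def find_unescaped_percent_alt (line : String) : Int := pvB_loop line.toList 0 0

-- ===== PRECONDITION & SPEC =====
def Spec_find_unescaped_percent (line : String) (out : Int) : Prop := out = find_unescaped_percent_alt line
instance (line : String) (out : Int) : Decidable (Spec_find_unescaped_percent line out) := by unfold Spec_find_unescaped_percent; infer_instance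

-- ===== CLAIM (what is proved, stated in full; the proofs are below) =====
def Claim_equal_find_unescaped_percent : Prop := ∀ (line : String), Dom_find_unescaped_percent line → Spec_find_unescaped_percent line (find_unescaped_percent line)

-- ===== LEMMAS AND PROOFS =====

theorem pvA_count_step (l : List Char) (i : Nat) (hi : i < l.length) :
    pvA_count l (i : Int) = if l[i] = '\\' then pvA_count l ((i : Int) - 1) + 1 else 0 := by
  have hg : PySem.List.pyGet? l (i : Int) = some l[i] := by
    simp [PySem.List.pyGet?, PySem.List.pyIdx?, hi]
  conv_lhs => rw [pvA_count.eq_def]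
  by_cases hb : l[i] = '\\' <;> simp [hg, hb]

theorem pvAB_loop (n : Nat) : ∀ (l : List Char) (i bs : Nat),
    l.length - i = n → i ≤ l.length → pvA_count l ((i : Int) - 1) = bs →
    pvA_loop l i = pvB_loop (l.drop i) i bs := by
  induction n with
  | zero =>
    intro l i bs hn hle _
    have : i = l.length := by omega
    subst this
    unfold pvA_loop
    rw [List.drop_length]
    simp [pvB_loop]
  | succ n ih =>
    intro l i bs hn hle hbs
    have hi : i < l.length := by omega
    have hdrop : l.drop i = l[i] :: l.drop (i + 1) := List.drop_eq_getElem_cons hi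
    unfold pvA_loop
    rw [hdrop]
    simp only [hi, dif_pos]
    rw [pvB_loop, hbs]
    by_cases hc : l[i] = '%' ∧ bs % 2 = 0
    · simp [hc]
    · have hinv : pvA_count l (((i + 1 : Nat) : Int) - 1) = (if l[i] = '\\' then bs + 1 else 0) := by
        have h1 : (((i + 1 : Nat) : Int) - 1) = (i : Int) := by push_cast; ring
        rw [h1, pvA_count_step l i hi, hbs]
      simp only [hc, if_false]
      exact ih l (i + 1) _ (by omega) (by omega) hinv

-- ===== VERDICT (by name: the statement is the Claim_ definition above) =====
theorem find_unescaped_percent_spec : Claim_equal_find_unescaped_percent := by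
  intro line _
  unfold Spec_find_unescaped_percent find_unescaped_percent find_unescaped_percent_alt
  have h := pvAB_loop line.toList.length line.toList 0 0 (by omega) (by omega) ?_
  · simpa using h
  · unfold pvA_count; simp
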